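-- pv_equiv track=rewrite | github.com/ArkiWang/LeetcodePy | src/Solution87.py | getleftpart
-- ===== SOURCE A (Python) =====
-- def getleftpart(s1: str, s2: str) ->():
--     i = 0; j = 0
--     li = []; lj = []
--     pi, pj = 0,0
--     lpi, lpj =0,0
--     while i < len(s1) and j < len(s2) and ((pi == 0 and pj == 0) or s1[i] == s2[j]):
--         lpi, lpj = pi, pj
--         li.append(s1[i])
--         lj.append(s2[j])
--         i += 1
--         j += 1
--         #if li == lj: return i, j
--         if sorted(li).__eq__(sorted(lj)):
--             #pi, pj = i, j
--             return i,j
--     if pi == len(s1) and lpi != 0: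
--         return lpi,lpj
--     return pi, pj
-- ===== SOURCE B (Python) =====
-- def getleftpart(s1: str, s2: str) ->():
--     # Incremental char-count difference: first prefix length k where the two
--     # prefixes are anagrams, found by keeping counts balanced -- no re-sorting.
--     diff = {}
--     n = min(len(s1), len(s2))
--     for k in range(n):
--         c1, c2 = s1[k], s2[k]
--         diff[c1] = diff.get(c1, 0) + 1
--         diff[c2] = diff.get(c2, 0) - 1
--         if all(v == 0 for v in diff.values()):
--             return k + 1, k + 1
--     return 0, 0
-- ===== Notes on version B (the rewrite author's own statement) =====
-- stated objective: faster
-- what changed: Replaces A's per-step re-sorting of both growing prefix lists (dead pi/pj/lpi/lpj state dropped) by a single pass maintaining an incremental character-count difference dict, returning the first prefix length at which all counts balance.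
import Mathlib
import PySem

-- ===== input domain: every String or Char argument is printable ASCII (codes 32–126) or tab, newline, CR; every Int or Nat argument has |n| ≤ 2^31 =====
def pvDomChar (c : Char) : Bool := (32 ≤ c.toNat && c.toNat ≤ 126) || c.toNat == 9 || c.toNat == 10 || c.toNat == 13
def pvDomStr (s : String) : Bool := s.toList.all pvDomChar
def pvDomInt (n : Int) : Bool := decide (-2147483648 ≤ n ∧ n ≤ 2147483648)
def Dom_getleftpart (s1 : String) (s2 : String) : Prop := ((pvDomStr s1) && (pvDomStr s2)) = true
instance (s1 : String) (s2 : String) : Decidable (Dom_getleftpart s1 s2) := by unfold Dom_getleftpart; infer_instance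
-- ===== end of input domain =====

-- ===== PORT A =====
def getleftpartLoop (c1 c2 : List Char) (i j : Nat) (li lj : List Char)
    (pi pj lpi lpj : Int) : List Int :=
  if h : i < c1.length ∧ j < c2.length ∧
      ((pi = 0 ∧ pj = 0) ∨ c1.getD i ' ' = c2.getD j ' ') then
    let lpi' := pi
    let lpj' := pj
    let li' := li ++ [c1.getD i ' ']
    let lj' := lj ++ [c2.getD j ' ']
    if PySem.List.sorted li' (fun x => x) false =
        PySem.List.sorted lj' (fun x => x) false then
      [((i + 1 : Nat) : Int), ((j + 1 : Nat) : Int)]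
    else getleftpartLoop c1 c2 (i + 1) (j + 1) li' lj' pi pj lpi' lpj'
  else if pi = (c1.length : Int) ∧ lpi ≠ 0 then [lpi, lpj] else [pi, pj]
termination_by c1.length - i
decreasing_by omega

def getleftpart (s1 : String) (s2 : String) : List Int :=
  getleftpartLoop s1.toList s2.toList 0 0 [] [] 0 0 0 0

-- ===== PORT B =====
def getleftpartAltLoop (c1 c2 : List Char) (k : Nat)
    (diff : PySem.Dict Char Int) : List Int :=
  if h : k < min c1.length c2.length then
    let a := c1.getD k ' '
    let b := c2.getD k ' '
    let d' := (diff.modify a 0 (· + 1)).modify b 0 (· - 1)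
    if d'.values.all (fun v => v == 0) then
      [((k + 1 : Nat) : Int), ((k + 1 : Nat) : Int)]
    else getleftpartAltLoop c1 c2 (k + 1) d'
  else [0, 0]
termination_by min c1.length c2.length - k
decreasing_by omega

def getleftpart_alt (s1 : String) (s2 : String) : List Int :=
  getleftpartAltLoop s1.toList s2.toList 0 PySem.Dict.empty

-- ===== PRECONDITION & SPEC =====
def Spec_getleftpart (s1 : String) (s2 : String) (out : List Int) : Prop := out = getleftpart_alt s1 s2
instance (s1 : String) (s2 : String) (out : List Int) : Decidable (Spec_getleftpart s1 s2 out) := by unfold Spec_getleftpart; infer_instance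

-- ===== CLAIM (what is proved, stated in full; the proofs are below) =====
def Claim_equal_getleftpart : Prop := ∀ (s1 : String) (s2 : String), Dom_getleftpart s1 s2 → Spec_getleftpart s1 s2 (getleftpart s1 s2)

-- ===== LEMMAS AND PROOFS =====

lemma allzero_iff (d : PySem.Dict Char Int) (hnd : d.keys.Nodup) (l1 l2 : List Char)
    (hinv : ∀ c, d.getD c 0 = (l1.count c : Int) - (l2.count c : Int))
    (hkeys : ∀ c, (c ∈ l1 ∨ c ∈ l2) → c ∈ d.keys) :
    (d.values.all (fun v => v == 0) = true) ↔ l1.Perm l2 := by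
  rw [List.perm_iff_count, PySem.Dict.values_eq_map_keys d hnd 0, List.all_map, List.all_eq_true]
  constructor
  · intro h c
    by_cases hc : c ∈ l1 ∨ c ∈ l2
    · have := h c (hkeys c hc)
      simp only [Function.comp, beq_iff_eq] at this
      have h2 := hinv c
      omega
    · push Not at hc
      rw [List.count_eq_zero_of_not_mem hc.1, List.count_eq_zero_of_not_mem hc.2]
  · intro h k _
    simp only [Function.comp, beq_iff_eq, hinv k, h k]
    omega

lemma nodup_keys_step (d : PySem.Dict Char Int) (hnd : d.keys.Nodup) (a b : Char) :
    ((d.modify a 0 (· + 1)).modify b 0 (· - 1)).keys.Nodup := by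
  rw [PySem.Dict.keys_modify]
  apply PySem.Dict.nodup_keys_insert
  rw [PySem.Dict.keys_modify]
  exact PySem.Dict.nodup_keys_insert _ _ _ hnd

lemma mem_keys_step (d : PySem.Dict Char Int) (a b c : Char) :
    c ∈ ((d.modify a 0 (· + 1)).modify b 0 (· - 1)).keys ↔ c = b ∨ c = a ∨ c ∈ d.keys := by
  rw [PySem.Dict.keys_modify, PySem.Dict.mem_keys_insert,
      PySem.Dict.keys_modify, PySem.Dict.mem_keys_insert]

lemma getD_step (d : PySem.Dict Char Int) (a b c : Char) :
    ((d.modify a 0 (· + 1)).modify b 0 (· - 1)).getD c 0 =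
      d.getD c 0 + (if c = a then 1 else 0) - (if c = b then 1 else 0) := by
  rcases eq_or_ne c b with hb | hb
  · subst hb
    rcases eq_or_ne c a with ha | ha
    · subst ha; simp
    · simp [PySem.Dict.getD_modify, ha]
  · rcases eq_or_ne c a with ha | ha
    · subst ha; simp [PySem.Dict.getD_modify, hb]
    · simp [PySem.Dict.getD_modify, ha, hb]

lemma count_take_succ (l : List Char) (k : Nat) (hk : k < l.length) (c : Char) :
    (l.take (k + 1)).count c = (l.take k).count c + (if c = l.getD k ' ' then 1 else 0) := by
  rw [List.take_add_one, List.getElem?_eq_getElem hk, List.getD_eq_getElem l ' ' hk]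
  simp only [Option.toList_some, List.count_append, List.count_cons, List.count_nil, beq_iff_eq]
  split_ifs <;> simp_all

lemma loop_eq (c1 c2 : List Char) (n : Nat) : ∀ (k : Nat) (d : PySem.Dict Char Int),
    min c1.length c2.length - k = n →
    d.keys.Nodup →
    (∀ c, d.getD c 0 = ((c1.take k).count c : Int) - ((c2.take k).count c : Int)) →
    (∀ c, (c ∈ c1.take k ∨ c ∈ c2.take k) → c ∈ d.keys) →
    getleftpartLoop c1 c2 k k (c1.take k) (c2.take k) 0 0 0 0 = getleftpartAltLoop c1 c2 k d := by
  induction n with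
  | zero =>
    intro k d hn hnd hinv hkeys
    have hk : ¬ k < min c1.length c2.length := by omega
    rw [getleftpartLoop, getleftpartAltLoop]
    rw [dif_neg (by omega), dif_neg hk]
    simp
  | succ n ih =>
    intro k d hn hnd hinv hkeys
    have hk : k < min c1.length c2.length := by omega
    have hk1 : k < c1.length := by omega
    have hk2 : k < c2.length := by omega
    rw [getleftpartLoop, getleftpartAltLoop]
    rw [dif_pos ⟨hk1, hk2, Or.inl ⟨rfl, rfl⟩⟩, dif_pos hk]
    have ht1 : c1.take k ++ [c1.getD k ' '] = c1.take (k + 1) := by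
      rw [List.take_add_one, List.getElem?_eq_getElem hk1, List.getD_eq_getElem c1 ' ' hk1]
      rfl
    have ht2 : c2.take k ++ [c2.getD k ' '] = c2.take (k + 1) := by
      rw [List.take_add_one, List.getElem?_eq_getElem hk2, List.getD_eq_getElem c2 ' ' hk2]
      rfl
    -- the updated dict's invariants
    have hnd' := nodup_keys_step d hnd (c1.getD k ' ') (c2.getD k ' ')
    have hinv' : ∀ c, ((d.modify (c1.getD k ' ') 0 (· + 1)).modify (c2.getD k ' ') 0 (· - 1)).getD c 0 =
        ((c1.take (k + 1)).count c : Int) - ((c2.take (k + 1)).count c : Int) := by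
      intro c
      rw [getD_step, hinv c, count_take_succ c1 k hk1 c, count_take_succ c2 k hk2 c]
      split_ifs <;> push_cast <;> ring
    have hkeys' : ∀ c, (c ∈ c1.take (k + 1) ∨ c ∈ c2.take (k + 1)) →
        c ∈ ((d.modify (c1.getD k ' ') 0 (· + 1)).modify (c2.getD k ' ') 0 (· - 1)).keys := by
      intro c hc
      rw [mem_keys_step]
      rw [← ht1, ← ht2] at hc
      rcases hc with hc | hc
      · rcases List.mem_append.mp hc with hc | hc
        · exact Or.inr (Or.inr (hkeys c (Or.inl hc)))
        · exact Or.inr (Or.inl (List.mem_singleton.mp hc))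
      · rcases List.mem_append.mp hc with hc | hc
        · exact Or.inr (Or.inr (hkeys c (Or.inr hc)))
        · exact Or.inl (List.mem_singleton.mp hc)
    -- the two success tests agree
    have htest : (PySem.List.sorted (c1.take k ++ [c1.getD k ' ']) (fun x => x) false =
        PySem.List.sorted (c2.take k ++ [c2.getD k ' ']) (fun x => x) false) ↔
        (((d.modify (c1.getD k ' ') 0 (· + 1)).modify (c2.getD k ' ') 0 (· - 1)).values.all
          (fun v => v == 0) = true) := by
      rw [ht1, ht2, PySem.List.sorted_id_eq_sorted_id_iff_perm,
          allzero_iff _ hnd' _ _ hinv' hkeys']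
    by_cases hs : PySem.List.sorted (c1.take k ++ [c1.getD k ' ']) (fun x => x) false =
        PySem.List.sorted (c2.take k ++ [c2.getD k ' ']) (fun x => x) false
    · rw [if_pos hs, if_pos (htest.mp hs)]
    · rw [if_neg hs, if_neg (fun h => hs (htest.mpr h))]
      rw [ht1, ht2]
      exact ih (k + 1) _ (by omega) hnd' hinv' hkeys'


-- ===== VERDICT (by name: the statement is the Claim_ definition above) =====
theorem getleftpart_spec : Claim_equal_getleftpart := by
  intro s1 s2 _
  unfold Spec_getleftpart getleftpart getleftpart_alt
  have := loop_eq s1.toList s2.toList (min s1.toList.length s2.toList.length) 0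
    PySem.Dict.empty (by omega) PySem.Dict.nodup_keys_empty
    (by intro c; simp [PySem.Dict.getD_empty])
    (by intro c hc; simp at hc)
  simpa using this
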